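-- pv_equiv track=rewrite | github.com/Luiz-santos134/Sistema-de-Recomenda-o | app.py | recomendar_curso
-- ===== SOURCE A (Python) =====
-- cursos = {
--     "Python para Iniciantes": ["programação", "python", "lógica"],
--     "Marketing Digital": ["marketing", "redes sociais", "estratégia"],
--     "Design Gráfico": ["design", "photoshop", "criatividade"],
--     "Desenvolvimento Web": ["programação", "web", "javascript"],
--     "Fotografia Profissional": ["fotografia", "edição", "criatividade"],
-- }
--
-- def recomendar_curso(interesses):
--     """Recomenda um curso com base nos interesses do usuário."""
--
--     recomendacoes = {}
--
--     # Percorre os cursos e verifica quantos interesses combinam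
--     for curso, tags in cursos.items():
--         similaridade = len(set(interesses) & set(tags))  # Conta interesses em comum
--         if similaridade > 0:
--             recomendacoes[curso] = similaridade
--
--     # Ordena os cursos pelo número de interesses em comum
--     if not recomendacoes:
--         return "Nenhuma recomendação encontrada."
--
--     curso_recomendado = max(recomendacoes, key=recomendacoes.get)
--     return f"Recomendação: {curso_recomendado}"
-- ===== SOURCE B (Python) =====
-- cursos = {
--     "Python para Iniciantes": ["programação", "python", "lógica"],
--     "Marketing Digital": ["marketing", "redes sociais", "estratégia"],
--     "Design Gráfico": ["design", "photoshop", "criatividade"],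
--     "Desenvolvimento Web": ["programação", "web", "javascript"],
--     "Fotografia Profissional": ["fotografia", "edição", "criatividade"],
-- }
--
-- def recomendar_curso(interesses):
--     """Recomenda um curso com base nos interesses do usuário."""
--     melhor = None
--     melhor_sim = 0
--     for curso, tags in cursos.items():
--         sim = len(set(interesses) & set(tags))
--         if sim > melhor_sim:
--             melhor, melhor_sim = curso, sim
--     if melhor is None:
--         return "Nenhuma recomendação encontrada."
--     return f"Recomendação: {melhor}"
-- ===== Notes on version B (the rewrite author's own statement) =====
-- stated objective: simpler
-- what changed: Replaced A's build-a-recommendations-dict-then-max-over-it two-phase scheme with a single loop that tracks the running best course and best score directly, so the intermediate dict and the max-with-key lookup disappear.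
import Mathlib
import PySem

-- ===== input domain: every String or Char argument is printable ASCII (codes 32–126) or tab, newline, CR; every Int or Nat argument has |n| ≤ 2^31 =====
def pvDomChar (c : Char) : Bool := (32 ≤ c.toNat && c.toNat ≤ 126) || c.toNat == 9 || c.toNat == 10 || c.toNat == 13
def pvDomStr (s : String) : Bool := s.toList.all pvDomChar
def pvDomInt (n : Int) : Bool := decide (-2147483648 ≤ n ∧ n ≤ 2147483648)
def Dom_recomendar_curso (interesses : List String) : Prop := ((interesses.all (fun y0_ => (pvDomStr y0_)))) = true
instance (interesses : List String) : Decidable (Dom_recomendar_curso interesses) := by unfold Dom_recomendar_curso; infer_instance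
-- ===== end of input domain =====

-- B replaces A's build-a-dict-then-max-over-it scheme with a single running-best pass (simpler decomposition, same cost).

-- the module-level `cursos` dict, shared by both programs (as an insertion-ordered assoc list)
def pvCursos : List (String × List String) :=
  [("Python para Iniciantes", ["programação", "python", "lógica"]),
   ("Marketing Digital", ["marketing", "redes sociais", "estratégia"]),
   ("Design Gráfico", ["design", "photoshop", "criatividade"]),
   ("Desenvolvimento Web", ["programação", "web", "javascript"]),
   ("Fotografia Profissional", ["fotografia", "edição", "criatividade"])]

-- len(set(interesses) & set(tags)) : the number of elements of set(interesses) & set(tags)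
-- (a Set is its list of distinct elements, so its Python len is the list length; Nat since it is only compared)
def pvSim (interesses tags : List String) : Nat :=
  (PySem.Set.inter (PySem.Set.ofList interesses) (PySem.Set.ofList tags)).length

-- ===== PORT A =====
def recomendar_curso (interesses : List String) : String :=
  let recomendacoes : PySem.Dict String Nat :=
    pvCursos.foldl (fun d p =>
      let similaridade := pvSim interesses p.2
      if similaridade > 0 then d.insert p.1 similaridade else d) (PySem.Dict.mk [])
  if recomendacoes.items = [] then "Nenhuma recomendação encontrada."
  else
    -- max(recomendacoes, key=recomendacoes.get): every key is present, so .get = .getD _ 0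
    match PySem.List.max? recomendacoes.keys (fun k => recomendacoes.getD k 0) with
    | some curso_recomendado => "Recomendação: " ++ curso_recomendado
    | none => ""  -- unreachable: in this branch the dict is nonempty

-- ===== PORT B =====
def recomendar_curso_alt (interesses : List String) : String :=
  let r : Option String × Nat :=
    pvCursos.foldl (fun acc p =>
      let sim := pvSim interesses p.2
      if sim > acc.2 then (some p.1, sim) else acc) (none, 0)
  match r.1 with
  | none => "Nenhuma recomendação encontrada."
  | some melhor => "Recomendação: " ++ melhor

-- ===== PRECONDITION & SPEC =====
def Spec_recomendar_curso (interesses : List String) (out : String) : Prop := out = recomendar_curso_alt interesses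
instance (interesses : List String) (out : String) : Decidable (Spec_recomendar_curso interesses out) := by unfold Spec_recomendar_curso; infer_instance

-- ===== CLAIM (what is proved, stated in full; the proofs are below) =====
def Claim_equal_recomendar_curso : Prop := ∀ (interesses : List String), Dom_recomendar_curso interesses → Spec_recomendar_curso interesses (recomendar_curso interesses)

-- ===== LEMMAS AND PROOFS =====

-- the first-maximum fold step of Python's max (on (name, score) pairs, keyed by score)
def pvMaxStep (acc : Option (String × Nat)) (x : String × Nat) : Option (String × Nat) :=
  match acc with
  | none => some x
  | some m => if m.2 < x.2 then some x else some m

-- the same step on bare keys, scored by a lookup function g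
def pvKeyStep (g : String → Nat) (acc : Option String) (x : String) : Option String :=
  match acc with
  | none => some x
  | some m => if g m < g x then some x else some m

-- B's accumulator, seen as an optional (course, score) pair with a positive score
def pvToSt : Option (String × Nat) → Option String × Nat
  | none => (none, 0)
  | some (c, v) => (some c, v)

theorem pv_max?_eq_foldl (f : List (String × Nat)) :
    PySem.List.max? f (fun p => p.2) = f.foldl pvMaxStep none := by
  unfold PySem.List.max?
  congr 1
  funext a x
  cases a <;> rfl

theorem pv_max?_keys_eq_foldl (xs : List String) (g : String → Nat) :
    PySem.List.max? xs g = xs.foldl (pvKeyStep g) none := by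
  unfold PySem.List.max?
  congr 1
  funext a x
  cases a <;> rfl

-- A's conditional-insert loop over fresh distinct keys builds exactly the filtered assoc list
theorem pv_dict_items (l : List (String × Nat)) (hnd : (l.map Prod.fst).Nodup) :
    (l.foldl (fun d p => if 0 < p.2 then d.insert p.1 p.2 else d)
      (PySem.Dict.mk ([] : List (String × Nat)))).items = l.filter (fun p => 0 < p.2) := by
  have h := List.foldl_filter (p := fun p : String × Nat => decide (0 < p.2))
    (f := fun (d : PySem.Dict String Nat) (p : String × Nat) => d.insert p.1 p.2)
    (l := l) (init := PySem.Dict.mk ([] : List (String × Nat)))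
  have h2 := PySem.Dict.items_foldl_insert_fresh (l.filter (fun p => 0 < p.2))
    Prod.fst Prod.snd (PySem.Dict.mk ([] : List (String × Nat)))
    (by intro a _; rfl)
    ((List.filter_sublist.map Prod.fst).nodup hnd)
  rw [h] at h2
  simp only [decide_eq_true_eq] at h2
  simpa using h2

-- lookup of a member pair in a nodup-keyed assoc list returns its own value
theorem pv_getD_self (f : List (String × Nat)) (hnd : (f.map Prod.fst).Nodup)
    (p : String × Nat) (hp : p ∈ f) : (PySem.Dict.mk f).getD p.1 0 = p.2 := by
  induction f with
  | nil => cases hp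
  | cons q t ih =>
    simp only [List.map_cons, List.nodup_cons] at hnd
    by_cases hqp : q.1 = p.1
    · have hpq : p = q := by
        rcases List.mem_cons.mp hp with h | h
        · exact h
        · exact absurd (by rw [hqp]; exact List.mem_map_of_mem h) hnd.1
      subst hpq
      simp [PySem.Dict.getD, PySem.Dict.get?]
    · have hpt : p ∈ t := by
        rcases List.mem_cons.mp hp with h | h
        · exact absurd (by rw [h]) hqp
        · exact h
      have := ih hnd.2 hpt
      simpa [PySem.Dict.getD, PySem.Dict.get?, List.find?_cons, hqp] using this

-- max over the keys with key = lookup equals max over the pairs by value, projected to the key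
theorem pv_max_aux (f : List (String × Nat)) (g : String → Nat)
    (hg : ∀ p ∈ f, g p.1 = p.2) :
    ∀ (t : List (String × Nat)) (macc : Option (String × Nat)),
      (∀ p ∈ t, p ∈ f) → (∀ p, macc = some p → p ∈ f) →
      (t.map Prod.fst).foldl (pvKeyStep g) (macc.map Prod.fst)
      = (t.foldl pvMaxStep macc).map Prod.fst := by
  intro t
  induction t with
  | nil => intro macc _ _; rfl
  | cons x t ih =>
    intro macc ht hm
    have hx : x ∈ f := ht x List.mem_cons_self
    have ht' : ∀ p ∈ t, p ∈ f := fun p hp => ht p (List.mem_cons_of_mem _ hp)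
    cases macc with
    | none =>
      simpa [pvKeyStep, pvMaxStep] using
        ih (some x) ht' (fun p h => (Option.some.inj h) ▸ hx)
    | some m =>
      have hmf : m ∈ f := hm m rfl
      simp only [List.map_cons, List.foldl_cons, Option.map_some, pvKeyStep, pvMaxStep]
      rw [hg m hmf, hg x hx]
      by_cases hlt : m.2 < x.2
      · simp only [if_pos hlt]
        simpa using ih (some x) ht' (fun p h => (Option.some.inj h) ▸ hx)
      · simp only [if_neg hlt]
        simpa using ih (some m) ht' (fun p h => (Option.some.inj h) ▸ hmf)

theorem pv_max_keys (f : List (String × Nat)) (hnd : (f.map Prod.fst).Nodup) :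
    PySem.List.max? (PySem.Dict.mk f).keys (fun k => (PySem.Dict.mk f).getD k 0)
      = (PySem.List.max? f (fun p => p.2)).map Prod.fst := by
  have hkeys : (PySem.Dict.mk f).keys = f.map Prod.fst := rfl
  rw [hkeys, pv_max?_keys_eq_foldl, pv_max?_eq_foldl]
  exact pv_max_aux f _ (fun p hp => pv_getD_self f hnd p hp) f none
    (fun p hp => hp) (fun p h => by cases h)

-- B's running-best loop equals the first-max fold over the positive entries
theorem pv_best (l : List (String × Nat)) :
    ∀ (m : Option (String × Nat)), (∀ p, m = some p → 0 < p.2) →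
    l.foldl (fun acc p => if acc.2 < p.2 then (some p.1, p.2) else acc) (pvToSt m)
    = pvToSt (l.foldl (fun acc p => if 0 < p.2 then pvMaxStep acc p else acc) m) := by
  induction l with
  | nil => intro m _; rfl
  | cons p t ih =>
    intro m hm
    by_cases hp : 0 < p.2
    · cases m with
      | none =>
        simpa [pvToSt, pvMaxStep, hp] using
          ih (some p) (fun q h => (Option.some.inj h) ▸ hp)
      | some q =>
        have hq : 0 < q.2 := hm q rfl
        by_cases hlt : q.2 < p.2
        · simpa [pvToSt, pvMaxStep, hp, hlt] using
            ih (some p) (fun r h => (Option.some.inj h) ▸ hp)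
        · simpa [pvToSt, pvMaxStep, hp, hlt] using
            ih (some q) (fun r h => (Option.some.inj h) ▸ hq)
    · have hz : p.2 = 0 := Nat.eq_zero_of_not_pos hp
      have hcond : ¬ (pvToSt m).2 < p.2 := by rw [hz]; exact Nat.not_lt_zero _
      simp only [List.foldl_cons, if_neg hcond, if_neg hp]
      exact ih m hm

theorem pv_filter_step (l : List (String × Nat)) :
    PySem.List.max? (l.filter (fun p => 0 < p.2)) (fun p => p.2)
    = l.foldl (fun acc p => if 0 < p.2 then pvMaxStep acc p else acc) none := by
  rw [pv_max?_eq_foldl, List.foldl_filter]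
  congr 1
  funext a x
  by_cases h : 0 < x.2 <;> simp [h]

-- ===== VERDICT (by name: the statement is the Claim_ definition above) =====
theorem recomendar_curso_spec : Claim_equal_recomendar_curso := by
  intro interesses _
  unfold Spec_recomendar_curso recomendar_curso recomendar_curso_alt
  have hnodup : ((pvCursos.map (fun p => (p.1, pvSim interesses p.2))).map Prod.fst).Nodup := by
    have : (pvCursos.map (fun p => (p.1, pvSim interesses p.2))).map Prod.fst
        = pvCursos.map Prod.fst := by simp
    rw [this]; decide
  have hA : pvCursos.foldl (fun d p =>
        let similaridade := pvSim interesses p.2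
        if similaridade > 0 then d.insert p.1 similaridade else d) (PySem.Dict.mk [])
      = (pvCursos.map (fun p => (p.1, pvSim interesses p.2))).foldl
          (fun d p => if 0 < p.2 then d.insert p.1 p.2 else d)
          (PySem.Dict.mk ([] : List (String × Nat))) :=
    (List.foldl_map (f := fun p : String × List String => (p.1, pvSim interesses p.2))
      (g := fun (d : PySem.Dict String Nat) (q : String × Nat) =>
        if 0 < q.2 then d.insert q.1 q.2 else d)
      (l := pvCursos) (init := PySem.Dict.mk [])).symm
  have hB : pvCursos.foldl (fun (acc : Option String × Nat) p =>
        let sim := pvSim interesses p.2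
        if sim > acc.2 then (some p.1, sim) else acc) (none, 0)
      = (pvCursos.map (fun p => (p.1, pvSim interesses p.2))).foldl
          (fun acc p => if acc.2 < p.2 then (some p.1, p.2) else acc)
          ((none : Option String), 0) :=
    (List.foldl_map (f := fun p : String × List String => (p.1, pvSim interesses p.2))
      (g := fun (acc : Option String × Nat) (q : String × Nat) =>
        if acc.2 < q.2 then (some q.1, q.2) else acc)
      (l := pvCursos) (init := ((none : Option String), 0))).symm
  have hd : (pvCursos.map (fun p => (p.1, pvSim interesses p.2))).foldl
        (fun d p => if 0 < p.2 then d.insert p.1 p.2 else d)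
        (PySem.Dict.mk ([] : List (String × Nat)))
      = PySem.Dict.mk ((pvCursos.map (fun p => (p.1, pvSim interesses p.2))).filter
          (fun p => 0 < p.2)) :=
    PySem.Dict.ext (pv_dict_items _ hnodup)
  have hfilter_nodup : (((pvCursos.map (fun p => (p.1, pvSim interesses p.2))).filter
      (fun p => 0 < p.2)).map Prod.fst).Nodup :=
    (List.filter_sublist.map Prod.fst).nodup hnodup
  have hbest := pv_best (pvCursos.map (fun p => (p.1, pvSim interesses p.2))) none
    (fun p h => by cases h)
  simp only [hA, hB, hd]
  rw [show (pvToSt none : Option String × Nat) = (none, 0) from rfl] at hbest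
  rw [hbest, ← pv_filter_step, pv_max_keys _ hfilter_nodup]
  cases hmax : PySem.List.max? ((pvCursos.map (fun p => (p.1, pvSim interesses p.2))).filter
      (fun p => 0 < p.2)) (fun p => p.2) with
  | none =>
    have hnil := (PySem.List.max?_eq_none_iff _ _).mp hmax
    simp [hnil, pvToSt]
  | some p =>
    have hne : ((pvCursos.map (fun p => (p.1, pvSim interesses p.2))).filter
        (fun p => 0 < p.2)) ≠ [] := by
      intro h
      rw [h] at hmax
      simp [PySem.List.max?] at hmax
    obtain ⟨c, v⟩ := p
    simp [hne, pvToSt]
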